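-- pv_equiv track=rewrite | github.com/nialov/mosaic | mosaic.py | __get_tile_diff
-- ===== SOURCE A (Python) =====
-- def __get_tile_diff(t1, t2, bail_out_value):
--     diff = 0
--     for i in range(len(t1)):
--         # diff += (abs(t1[i][0] - t2[i][0]) + abs(t1[i][1] - t2[i][1]) + abs(t1[i][2] - t2[i][2]))
--         diff += (
--             (t1[i][0] - t2[i][0]) ** 2
--             + (t1[i][1] - t2[i][1]) ** 2
--             + (t1[i][2] - t2[i][2]) ** 2
--         )
--         if diff > bail_out_value:
--             # we know already that this isn't going to be the best fit, so no point continuing with this tile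
--             return diff
--     return diff
-- ===== SOURCE B (Python) =====
-- def __get_tile_diff(t1, t2, bail_out_value):
--     # Structural recursion threading the remaining budget through the threshold:
--     # each call compares the head pixel's squared difference against what is
--     # left of the bail-out budget, instead of keeping a running accumulator.
--     if not t1:
--         return 0
--     (r1, g1, b1), (r2, g2, b2) = t1[0], t2[0]
--     d = (r1 - r2) ** 2 + (g1 - g2) ** 2 + (b1 - b2) ** 2
--     if d > bail_out_value:
--         return d
--     return d + __get_tile_diff(t1[1:], t2[1:], bail_out_value - d)
-- ===== Notes on version B (the rewrite author's own statement) =====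
-- stated objective: alternative
-- what changed: Replaces A's iterative accumulate-and-test loop by a structural recursion on the tiles that threads the remaining bail-out budget through the threshold argument (no running accumulator); Pre_ excludes exactly the inputs on which both programs raise IndexError (t2 shorter than t1 with no bail-out inside the common prefix).
import Mathlib
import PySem

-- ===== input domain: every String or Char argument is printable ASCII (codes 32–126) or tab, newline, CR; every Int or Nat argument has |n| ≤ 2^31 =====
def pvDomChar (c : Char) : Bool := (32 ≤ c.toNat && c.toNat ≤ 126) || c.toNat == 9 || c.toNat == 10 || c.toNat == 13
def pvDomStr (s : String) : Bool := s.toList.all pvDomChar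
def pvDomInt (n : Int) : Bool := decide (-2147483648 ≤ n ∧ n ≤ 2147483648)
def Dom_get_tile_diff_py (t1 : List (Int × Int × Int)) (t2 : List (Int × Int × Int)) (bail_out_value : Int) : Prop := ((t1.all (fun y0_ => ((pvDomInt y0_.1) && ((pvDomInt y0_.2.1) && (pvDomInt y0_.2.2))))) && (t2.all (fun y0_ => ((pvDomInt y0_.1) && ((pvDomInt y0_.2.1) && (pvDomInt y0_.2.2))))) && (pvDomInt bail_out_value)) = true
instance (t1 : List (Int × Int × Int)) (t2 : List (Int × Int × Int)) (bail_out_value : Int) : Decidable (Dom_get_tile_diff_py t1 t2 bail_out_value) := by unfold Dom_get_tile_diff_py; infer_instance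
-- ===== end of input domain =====

-- B replaces A's iterative accumulate-and-test loop by a structural recursion on
-- the tiles that threads the remaining bail-out budget through the threshold
-- argument (alternative decomposition, same cost).

-- ===== PORT A =====
-- A's loop over range(len(t1)), accumulating and early-returning when diff > bail_out_value.
def pvALoop (t1 t2 : List (Int × Int × Int)) (bail_out_value : Int)
    (is : List Int) (diff : Int) : Int :=
  match is with
  | [] => diff
  | i :: rest =>
      let p := PySem.List.pyGetD t1 i (0, 0, 0)   -- t1[i]; i ∈ range(len(t1)) is in range
      let q := PySem.List.pyGetD t2 i (0, 0, 0)   -- t2[i]; reached only in range under Pre_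
      let d := diff + ((p.1 - q.1) ^ 2 + (p.2.1 - q.2.1) ^ 2 + (p.2.2 - q.2.2) ^ 2)
      if d > bail_out_value then d else pvALoop t1 t2 bail_out_value rest d

def get_tile_diff_py (t1 : List (Int × Int × Int)) (t2 : List (Int × Int × Int)) (bail_out_value : Int) : Int :=
  pvALoop t1 t2 bail_out_value (PySem.List.pyRange 0 t1.length 1) 0

-- ===== PORT B =====
-- Source B's structural recursion: head pixel's squared difference against the
-- remaining budget, then recurse on the tails with the budget reduced.
def get_tile_diff_py_alt (t1 : List (Int × Int × Int)) (t2 : List (Int × Int × Int)) (bail_out_value : Int) : Int :=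
  match t1 with
  | [] => 0
  | p :: rest =>
      let q := PySem.List.pyGetD t2 0 (0, 0, 0)   -- t2[0]; reached only in range under Pre_
      let d := (p.1 - q.1) ^ 2 + (p.2.1 - q.2.1) ^ 2 + (p.2.2 - q.2.2) ^ 2
      if d > bail_out_value then d
      else d + get_tile_diff_py_alt rest (PySem.List.slice t2 (some 1) none) (bail_out_value - d)   -- t2[1:]

-- ===== PRECONDITION & SPEC =====
-- squared RGB distance of one pixel pair (used by Pre_ and the proofs; not by the ports)
def pvSq (pq : (Int × Int × Int) × (Int × Int × Int)) : Int :=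
  (pq.1.1 - pq.2.1) ^ 2 + (pq.1.2.1 - pq.2.2.1) ^ 2 + (pq.1.2.2 - pq.2.2.2) ^ 2

-- Pre_ is exactly the inputs on which A (and likewise B) returns: either t2 is at least as
-- long as t1, or the bail-out fires within the common prefix (the squared differences are
-- nonnegative, so that happens iff their sum over the zipped prefix exceeds the threshold);
-- on all other inputs both programs raise IndexError.
def Pre_get_tile_diff_py (t1 : List (Int × Int × Int)) (t2 : List (Int × Int × Int)) (bail_out_value : Int) : Prop :=
  t1.length ≤ t2.length ∨ (t2 ≠ [] ∧ ((t1.zip t2).map pvSq).sum > bail_out_value)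
instance (t1 : List (Int × Int × Int)) (t2 : List (Int × Int × Int)) (bail_out_value : Int) : Decidable (Pre_get_tile_diff_py t1 t2 bail_out_value) := by unfold Pre_get_tile_diff_py; infer_instance

def pvWitness_get_tile_diff_py : (List (Int × Int × Int)) × (List (Int × Int × Int)) × Int :=
  ([(1, 2, 3), (4, 5, 6)], [(0, 0, 0), (0, 0, 0)], 10)

def Spec_get_tile_diff_py (t1 : List (Int × Int × Int)) (t2 : List (Int × Int × Int)) (bail_out_value : Int) (out : Int) : Prop := out = get_tile_diff_py_alt t1 t2 bail_out_value
instance (t1 : List (Int × Int × Int)) (t2 : List (Int × Int × Int)) (bail_out_value : Int) (out : Int) : Decidable (Spec_get_tile_diff_py t1 t2 bail_out_value out) := by unfold Spec_get_tile_diff_py; infer_instance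

-- ===== CLAIM (what is proved, stated in full; the proofs are below) =====
def Claim_equal_get_tile_diff_py : Prop := ∀ (t1 : List (Int × Int × Int)) (t2 : List (Int × Int × Int)) (bail_out_value : Int), Dom_get_tile_diff_py t1 t2 bail_out_value → Pre_get_tile_diff_py t1 t2 bail_out_value → Spec_get_tile_diff_py t1 t2 bail_out_value (get_tile_diff_py t1 t2 bail_out_value)

-- ===== LEMMAS AND PROOFS =====

-- A's loop abstracted to the list of per-pixel squared differences.
def pvLoopD (bail_out_value : Int) (ds : List Int) (diff : Int) : Int :=
  match ds with
  | [] => diff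
  | d :: rest =>
      if diff + d > bail_out_value then diff + d else pvLoopD bail_out_value rest (diff + d)

-- B's recursion abstracted likewise: remaining budget against each difference.
def pvBudget (bail_out_value : Int) (ds : List Int) : Int :=
  match ds with
  | [] => 0
  | d :: rest => if d > bail_out_value then d else d + pvBudget (bail_out_value - d) rest

-- the per-index squared-difference list A's loop walks
def pvMapA (t1 t2 : List (Int × Int × Int)) : List Int :=
  (PySem.List.pyRange 0 t1.length 1).map
    (fun i => pvSq (PySem.List.pyGetD t1 i (0,0,0), PySem.List.pyGetD t2 i (0,0,0)))

-- the squared-difference list B's recursion walks (t2 padded with the port default)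
def pvMapB (t1 t2 : List (Int × Int × Int)) : List Int :=
  match t1 with
  | [] => []
  | p :: rest => pvSq (p, PySem.List.pyGetD t2 0 (0,0,0)) :: pvMapB rest (t2.drop 1)

theorem pvALoop_eq_loopD (t1 t2 : List (Int × Int × Int)) (b : Int) (is : List Int) (diff : Int) :
    pvALoop t1 t2 b is diff
      = pvLoopD b (is.map (fun i => pvSq (PySem.List.pyGetD t1 i (0,0,0), PySem.List.pyGetD t2 i (0,0,0)))) diff := by
  induction is generalizing diff with
  | nil => rfl
  | cons i rest ih =>
      simp only [pvALoop, pvLoopD, List.map_cons, pvSq]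
      split
      · rfl
      · exact ih _

-- The accumulator form equals the budget form, for any start value.
theorem pvLoopD_eq_budget (ds : List Int) (b s : Int) :
    pvLoopD b ds s = s + pvBudget (b - s) ds := by
  induction ds generalizing b s with
  | nil => simp [pvLoopD, pvBudget]
  | cons d rest ih =>
      simp only [pvLoopD, pvBudget]
      by_cases h : s + d > b
      · rw [if_pos h, if_pos (show d > b - s by omega)]
      · rw [if_neg h, if_neg (show ¬ d > b - s by omega), ih b (s + d),
          show b - (s + d) = b - s - d from by ring]
        ring

-- B's port equals the budget recursion over pvMapB.
theorem pvAlt_eq_budget (t1 t2 : List (Int × Int × Int)) (b : Int) :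
    get_tile_diff_py_alt t1 t2 b = pvBudget b (pvMapB t1 t2) := by
  induction t1 generalizing t2 b with
  | nil => simp [get_tile_diff_py_alt, pvMapB, pvBudget]
  | cons p rest ih =>
      simp only [get_tile_diff_py_alt, pvMapB, pvBudget, pvSq]
      have hs : PySem.List.slice t2 (some 1) none = t2.drop 1 := by
        simpa using PySem.List.slice_from_natCast (xs := t2) (a := 1)
      rw [hs]
      split
      · rfl
      · rw [ih (t2.drop 1) _]

-- If the running sum exceeds the threshold within ds (nonnegative entries, ds nonempty),
-- the loop never looks past ds.
theorem pvLoopD_bail (extra : List Int) (b : Int) :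
    ∀ (ds : List Int) (s : Int), ds ≠ [] → (∀ d ∈ ds, 0 ≤ d) → s + ds.sum > b →
      pvLoopD b (ds ++ extra) s = pvLoopD b ds s := by
  intro ds
  induction ds with
  | nil => intro s h _ _; exact absurd rfl h
  | cons d rest ih =>
      intro s _ hpos hsum
      simp only [List.cons_append, pvLoopD]
      split
      · rfl
      · rename_i h
        rcases rest with _ | ⟨d', rest'⟩
        · simp only [List.sum_cons, List.sum_nil, add_zero] at hsum
          omega
        · exact ih (s + d) (by simp) (fun x hx => hpos x (List.mem_cons_of_mem _ hx))
            (by simp only [List.sum_cons] at hsum ⊢; omega)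

-- The first min(len t1, len t2) entries of pvMapA are the zipped squared differences.
theorem pvMapA_take (t1 t2 : List (Int × Int × Int)) :
    (pvMapA t1 t2).take (min t1.length t2.length) = (t1.zip t2).map pvSq := by
  apply List.ext_getElem
  · simp [pvMapA, PySem.List.length_pyRange_one, List.length_zip]
  · intro k h1 h2
    have hk1 : k < t1.length := by
      simp [List.length_zip] at h2; omega
    have hk2 : k < t2.length := by
      simp [List.length_zip] at h2; omega
    simp only [pvMapA, List.getElem_take, List.getElem_map,
      PySem.List.getElem_pyRange_one, List.getElem_zip]
    congr 1
    have e1 : PySem.List.pyGetD t1 ((0 : Int) + k) (0,0,0) = t1[k] := by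
      simpa using PySem.List.pyGetD_eq_getElem t1 (0,0,0) (i := (k:Int)) (by omega) (by simpa using hk1)
    have e2 : PySem.List.pyGetD t2 ((0 : Int) + k) (0,0,0) = t2[k] := by
      simpa using PySem.List.pyGetD_eq_getElem t2 (0,0,0) (i := (k:Int)) (by omega) (by simpa using hk2)
    rw [e1, e2]

-- The same for pvMapB.
theorem pvMapB_take (t1 t2 : List (Int × Int × Int)) :
    (pvMapB t1 t2).take (min t1.length t2.length) = (t1.zip t2).map pvSq := by
  induction t1 generalizing t2 with
  | nil => simp [pvMapB]
  | cons p rest ih =>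
      cases t2 with
      | nil => simp [pvMapB]
      | cons q qs =>
          simp only [pvMapB, List.length_cons, List.zip_cons_cons, List.map_cons,
            PySem.List.pyGetD_zero_cons, List.drop_one, List.tail_cons]
          rw [show min (rest.length + 1) (qs.length + 1) = (min rest.length qs.length) + 1 by omega]
          rw [List.take_succ_cons, ih qs]

theorem pvMapB_length (t1 t2 : List (Int × Int × Int)) :
    (pvMapB t1 t2).length = t1.length := by
  induction t1 generalizing t2 with
  | nil => rfl
  | cons p rest ih => simp [pvMapB, ih]

-- every entry of the zipped squared-difference list is nonnegative
theorem pvSq_nonneg (pq : (Int × Int × Int) × (Int × Int × Int)) : 0 ≤ pvSq pq := by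
  unfold pvSq; positivity

-- ===== VERDICT (by name: the statement is the Claim_ definition above) =====
theorem get_tile_diff_py_spec : Claim_equal_get_tile_diff_py := by
  intro t1 t2 b _ hpre
  unfold Spec_get_tile_diff_py get_tile_diff_py
  rw [pvALoop_eq_loopD, pvAlt_eq_budget,
    show pvBudget b (pvMapB t1 t2) = pvLoopD b (pvMapB t1 t2) 0 from by
      rw [pvLoopD_eq_budget]; simp]
  have hA : (PySem.List.pyRange 0 (t1.length : Int) 1).map
      (fun i => pvSq (PySem.List.pyGetD t1 i (0,0,0), PySem.List.pyGetD t2 i (0,0,0)))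
        = pvMapA t1 t2 := rfl
  rw [hA]
  have hlenA : (pvMapA t1 t2).length = t1.length := by
    simp [pvMapA, PySem.List.length_pyRange_one]
  by_cases hle : t1.length ≤ t2.length
  · -- t2 long enough: the two walked lists are equal outright
    have hmin : min t1.length t2.length = t1.length := by omega
    have e1 : pvMapA t1 t2 = (t1.zip t2).map pvSq := by
      rw [← pvMapA_take, hmin, List.take_of_length_le (le_of_eq hlenA)]
    have e2 : pvMapB t1 t2 = (t1.zip t2).map pvSq := by
      rw [← pvMapB_take, hmin, List.take_of_length_le (le_of_eq (pvMapB_length t1 t2))]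
    rw [e1, e2]
  · -- t2 shorter: Pre_ says the bail-out fires within the zipped prefix
    have hlt : t2.length < t1.length := by omega
    rcases hpre with hle' | ⟨ht2, hsum⟩
    · omega
    have hmin : min t1.length t2.length = t2.length := by omega
    have hzne : (t1.zip t2).map pvSq ≠ [] := by
      have : t1 ≠ [] := by intro h; rw [h] at hlt; simp at hlt
      cases t1 <;> cases t2 <;> simp_all
    have hpos : ∀ d ∈ (t1.zip t2).map pvSq, 0 ≤ d := by
      intro d hd
      rcases List.mem_map.mp hd with ⟨pq, _, rfl⟩
      exact pvSq_nonneg pq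
    have hsum0 : (0 : Int) + ((t1.zip t2).map pvSq).sum > b := by simpa using hsum
    have eA : pvMapA t1 t2 = (t1.zip t2).map pvSq ++ (pvMapA t1 t2).drop t2.length := by
      conv_lhs => rw [← List.take_append_drop t2.length (pvMapA t1 t2)]
      rw [← hmin, pvMapA_take, hmin]
    have eB : pvMapB t1 t2 = (t1.zip t2).map pvSq ++ (pvMapB t1 t2).drop t2.length := by
      conv_lhs => rw [← List.take_append_drop t2.length (pvMapB t1 t2)]
      rw [← hmin, pvMapB_take, hmin]
    rw [eA, eB, pvLoopD_bail _ _ _ _ hzne hpos hsum0, pvLoopD_bail _ _ _ _ hzne hpos hsum0]
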